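-- pv_equiv track=rewrite | github.com/GideonFr/EmProx | naslib/predictors/emprox_score.py | convert_arch_to_seq
-- ===== SOURCE A (Python) =====
-- def convert_arch_to_seq(matrix, ops, max_n=8):
--     seq = []
--     n = len(matrix)
--     max_n = max_n
--     assert n == len(ops)
--     for col in range(1, max_n):
--         if col >= n:
--             seq += [0 for i in range(col)]
--             seq.append(0)
--         else:
--             for row in range(col):
--                 seq.append(matrix[row][col] + 1)
--             seq.append(ops[col] + 2)
--
--     assert len(seq) == (max_n + 2) * (max_n - 1) / 2
--     return seq
-- ===== SOURCE B (Python) =====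
-- def convert_arch_to_seq(matrix, ops, max_n=8):
--     n = len(matrix)
--     assert n == len(ops)
--     # One flat loop over the fixed output length, decoding each position with a
--     # (col, row) counter state machine instead of nested per-column loops.
--     total = (max_n + 2) * (max_n - 1) // 2
--     seq = []
--     col, row = 1, 0
--     for _ in range(total):
--         if col >= n:
--             seq.append(0)
--         elif row == col:
--             seq.append(ops[col] + 2)
--         else:
--             seq.append(matrix[row][col] + 1)
--         if row == col:
--             col, row = col + 1, 0
--         else:
--             row += 1
--     return seq
-- ===== Notes on version B (the rewrite author's own statement) =====
-- stated objective: alternative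
-- what changed: Replaces A's nested per-column loops with branch padding by one flat loop over the closed-form output length (max_n+2)*(max_n-1)//2 that maintains a (col,row) counter state machine and selects each element (pad zero, op entry, or matrix entry) directly per position.
import Mathlib
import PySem

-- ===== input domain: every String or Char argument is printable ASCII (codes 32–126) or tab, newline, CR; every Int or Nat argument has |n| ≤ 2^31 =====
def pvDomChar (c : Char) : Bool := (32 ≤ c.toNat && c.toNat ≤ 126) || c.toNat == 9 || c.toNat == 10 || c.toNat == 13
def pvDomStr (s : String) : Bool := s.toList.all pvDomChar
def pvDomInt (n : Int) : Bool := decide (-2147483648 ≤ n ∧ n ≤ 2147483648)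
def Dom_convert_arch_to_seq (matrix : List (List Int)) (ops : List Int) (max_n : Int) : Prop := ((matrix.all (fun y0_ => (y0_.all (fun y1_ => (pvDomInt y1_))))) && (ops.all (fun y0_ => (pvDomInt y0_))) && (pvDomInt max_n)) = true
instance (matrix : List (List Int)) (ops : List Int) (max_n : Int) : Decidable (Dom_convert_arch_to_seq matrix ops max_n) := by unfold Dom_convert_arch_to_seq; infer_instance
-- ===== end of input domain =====

-- B replaces A's nested per-column loops and padding branch by one flat loop over the
-- closed-form output length that decodes each position with a (col,row) counter state machine.


-- ===== PORT A =====
def convert_arch_to_seq (matrix : List (List Int)) (ops : List Int) (max_n : Int) : List Int :=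
  let n : Int := matrix.length
  (PySem.List.pyRange 1 max_n 1).foldl (fun seq col =>
    if col ≥ n then
      (seq ++ (PySem.List.pyRange 0 col 1).map (fun _ => (0 : Int))) ++ [0]
    else
      ((PySem.List.pyRange 0 col 1).foldl (fun seq row =>
          seq ++ [PySem.List.pyGetD (PySem.List.pyGetD matrix row []) col 0 + 1]) seq)
        ++ [PySem.List.pyGetD ops col 0 + 2]) []

-- ===== PORT B =====
def convert_arch_to_seq_alt (matrix : List (List Int)) (ops : List Int) (max_n : Int) : List Int :=
  let n : Int := matrix.length
  let total : Int := PySem.Int.floordiv ((max_n + 2) * (max_n - 1)) 2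
  let res := (PySem.List.pyRange 0 total 1).foldl
    (fun (st : List Int × Int × Int) (_ : Int) =>
      let seq := st.1
      let col := st.2.1
      let row := st.2.2
      let seq :=
        if col ≥ n then seq ++ [0]
        else if row = col then seq ++ [PySem.List.pyGetD ops col 0 + 2]
        else seq ++ [PySem.List.pyGetD (PySem.List.pyGetD matrix row []) col 0 + 1]
      if row = col then (seq, col + 1, 0) else (seq, col, row + 1))
    ([], 1, 0)
  res.1

-- ===== PRECONDITION & SPEC =====
-- Pre_ is exactly where Python A returns: equal lengths (first assert), max_n ≥ 1 (else the final
-- length assert fails), and every visited matrix entry matrix[row][col] in range (else IndexError).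
def Pre_convert_arch_to_seq (matrix : List (List Int)) (ops : List Int) (max_n : Int) : Prop :=
  matrix.length = ops.length ∧ 1 ≤ max_n ∧
  ∀ col : Nat, col < min matrix.length max_n.toNat →
    ∀ row : Nat, row < col → col < (matrix.getD row []).length
instance (matrix : List (List Int)) (ops : List Int) (max_n : Int) : Decidable (Pre_convert_arch_to_seq matrix ops max_n) := by unfold Pre_convert_arch_to_seq; infer_instance

def pvWitness_convert_arch_to_seq : List (List Int) × List Int × Int :=
  ([[0, 1], [0, 0]], [1, 2], 4)

def Spec_convert_arch_to_seq (matrix : List (List Int)) (ops : List Int) (max_n : Int) (out : List Int) : Prop := out = convert_arch_to_seq_alt matrix ops max_n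
instance (matrix : List (List Int)) (ops : List Int) (max_n : Int) (out : List Int) : Decidable (Spec_convert_arch_to_seq matrix ops max_n out) := by unfold Spec_convert_arch_to_seq; infer_instance

-- ===== CLAIM (what is proved, stated in full; the proofs are below) =====
def Claim_equal_convert_arch_to_seq : Prop := ∀ (matrix : List (List Int)) (ops : List Int) (max_n : Int), Dom_convert_arch_to_seq matrix ops max_n → Pre_convert_arch_to_seq matrix ops max_n → Spec_convert_arch_to_seq matrix ops max_n (convert_arch_to_seq matrix ops max_n)

-- ===== LEMMAS AND PROOFS =====

-- the value B emits at position (col, row) with row < col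
def pvElt (matrix : List (List Int)) (col r : Int) : Int :=
  if col ≥ (matrix.length : Int) then 0
  else PySem.List.pyGetD (PySem.List.pyGetD matrix r []) col 0 + 1

-- the value B emits at position (col, col)
def pvLst (matrix : List (List Int)) (ops : List Int) (col : Int) : Int :=
  if col ≥ (matrix.length : Int) then 0 else PySem.List.pyGetD ops col 0 + 2

-- the whole block a column contributes
def pvBlk (matrix : List (List Int)) (ops : List Int) (col : Int) : List Int :=
  (PySem.List.pyRange 0 col 1).map (pvElt matrix col) ++ [pvLst matrix ops col]

-- one step of B's state machine
def pvStep (matrix : List (List Int)) (ops : List Int)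
    (st : List Int × Int × Int) : List Int × Int × Int :=
  let n : Int := matrix.length
  let seq := st.1
  let col := st.2.1
  let row := st.2.2
  let seq :=
    if col ≥ n then seq ++ [0]
    else if row = col then seq ++ [PySem.List.pyGetD ops col 0 + 2]
    else seq ++ [PySem.List.pyGetD (PySem.List.pyGetD matrix row []) col 0 + 1]
  if row = col then (seq, col + 1, 0) else (seq, col, row + 1)

theorem pv_foldl_const {α β : Type} (g : α → α) (l : List β) (init : α) :
    l.foldl (fun st _ => g st) init = g^[l.length] init := by
  induction l generalizing init with
  | nil => simp
  | cons x t ih => simp [List.foldl_cons, ih, Function.iterate_succ_apply]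

theorem pv_flat_len (g : Int → List Int) (a b : Int) (h0 : 0 ≤ a) (hab : a ≤ b)
    (hg : ∀ col, a ≤ col → col < b → ((g col).length : Int) = col + 1) :
    (((PySem.List.pyRange a b 1).flatMap g).length : Int) = (b * b + b) / 2 - (a * a + a) / 2 := by
  obtain ⟨k, hk⟩ : ∃ k : Nat, b - a = (k : Int) := ⟨(b - a).toNat, by omega⟩
  induction k generalizing a with
  | zero =>
      rw [PySem.List.pyRange_one_eq_nil (by omega)]
      have : a = b := by omega
      subst this; simp
  | succ k ih =>
      have hab' : a < b := by omega
      rw [PySem.List.pyRange_one_cons hab']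
      simp only [List.flatMap_cons, List.length_append]
      push_cast
      rw [hg a le_rfl hab',
        ih (a + 1) (by omega) (by omega) (fun col h1 h2 => hg col (by omega) h2) (by omega)]
      obtain ⟨p, hp⟩ := Int.even_mul_succ_self a
      have hp' : a * a + a = 2 * p := by linarith [hp]
      have hq : (a + 1) * (a + 1) + (a + 1) = (a * a + a) + 2 * (a + 1) := by ring
      omega

theorem pv_total (max_n : Int) :
    PySem.Int.floordiv ((max_n + 2) * (max_n - 1)) 2 = (max_n * max_n + max_n) / 2 - 1 := by
  rw [PySem.Int.floordiv_eq_ediv_of_pos (by norm_num)]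
  obtain ⟨p, hp⟩ := Int.even_mul_succ_self max_n
  have hp2 : max_n * max_n + max_n = 2 * p := by linarith [hp]
  have hq : (max_n + 2) * (max_n - 1) = (max_n * max_n + max_n) - 2 := by ring
  omega

-- running B's machine through the remainder of one column
theorem pv_sub (matrix : List (List Int)) (ops : List Int) (k : Nat) :
    ∀ (col row : Int) (seq : List Int), 0 ≤ row → row + k = col →
    (pvStep matrix ops)^[k + 1] (seq, col, row)
      = (seq ++ ((PySem.List.pyRange row col 1).map (pvElt matrix col)
          ++ [pvLst matrix ops col]), col + 1, 0) := by
  induction k with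
  | zero =>
      intro col row seq h0 hrc
      have : row = col := by omega
      subst this
      rw [Function.iterate_one, PySem.List.pyRange_one_eq_nil le_rfl]
      by_cases hn : row ≥ (matrix.length : Int) <;>
        simp [pvStep, pvLst, hn]
  | succ k ih =>
      intro col row seq h0 hrc
      have hne : row ≠ col := by omega
      rw [Function.iterate_succ_apply]
      have hstep : pvStep matrix ops (seq, col, row)
          = (seq ++ [pvElt matrix col row], col, row + 1) := by
        by_cases hn : col ≥ (matrix.length : Int) <;>
          simp [pvStep, pvElt, hne, hn]
      rw [hstep, ih col (row + 1) (seq ++ [pvElt matrix col row]) (by omega) (by omega),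
        PySem.List.pyRange_one_cons (show row < col by omega)]
      simp [List.append_assoc]

-- running B's machine through all remaining columns
theorem pv_cols (matrix : List (List Int)) (ops : List Int) (max_n : Int) (k : Nat) :
    ∀ (col : Int) (seq : List Int), 1 ≤ col → col + k = max_n →
    (pvStep matrix ops)^[((PySem.List.pyRange col max_n 1).flatMap (pvBlk matrix ops)).length]
        (seq, col, 0)
      = (seq ++ (PySem.List.pyRange col max_n 1).flatMap (pvBlk matrix ops), max_n, 0) := by
  induction k with
  | zero =>
      intro col seq h1 hc
      have : col = max_n := by omega
      subst this
      rw [PySem.List.pyRange_one_eq_nil le_rfl]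
      simp
  | succ k ih =>
      intro col seq h1 hc
      have hlt : col < max_n := by omega
      rw [PySem.List.pyRange_one_cons hlt]
      simp only [List.flatMap_cons, List.length_append]
      have hblen : (pvBlk matrix ops col).length = col.toNat + 1 := by
        simp [pvBlk, PySem.List.length_pyRange_one]
      rw [hblen, Nat.add_comm (col.toNat + 1), Function.iterate_add_apply]
      have hsub := pv_sub matrix ops col.toNat col 0 seq (le_refl 0)
        (by omega)
      rw [hsub]
      rw [ih (col + 1) _ (by omega) (by omega)]
      simp [pvBlk, List.append_assoc]

-- A's foldl produces exactly the concatenation of the column blocks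
theorem pv_A (matrix : List (List Int)) (ops : List Int) (max_n : Int) :
    convert_arch_to_seq matrix ops max_n
      = (PySem.List.pyRange 1 max_n 1).flatMap (pvBlk matrix ops) := by
  unfold convert_arch_to_seq
  dsimp only
  rw [PySem.List.foldl_congr_mem _ _ (fun seq col => seq ++ pvBlk matrix ops col) [] ?_]
  · rw [PySem.List.foldl_append_eq_flatMap]
    simp
  · intro acc col hcol
    by_cases hn : col ≥ (matrix.length : Int)
    · have he : (PySem.List.pyRange 0 col 1).map (pvElt matrix col)
          = (PySem.List.pyRange 0 col 1).map (fun _ => (0 : Int)) :=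
        List.map_congr_left (fun r _ => by simp [pvElt, hn])
      simp [hn, pvBlk, pvLst, he, List.append_assoc]
    · simp only [hn, if_false]
      rw [PySem.List.foldl_append_singleton_eq_map]
      simp [pvBlk, pvElt, pvLst, hn, List.append_assoc]

-- B's state machine produces the same concatenation (for max_n ≥ 1)
theorem pv_B (matrix : List (List Int)) (ops : List Int) (max_n : Int) (h : 1 ≤ max_n) :
    convert_arch_to_seq_alt matrix ops max_n
      = (PySem.List.pyRange 1 max_n 1).flatMap (pvBlk matrix ops) := by
  unfold convert_arch_to_seq_alt
  dsimp only
  show (((PySem.List.pyRange 0 (PySem.Int.floordiv ((max_n + 2) * (max_n - 1)) 2) 1).foldl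
      (fun st _ => pvStep matrix ops st) ([], 1, 0)).1) = _
  rw [pv_foldl_const, PySem.List.length_pyRange_one]
  have hflat : (((PySem.List.pyRange 1 max_n 1).flatMap (pvBlk matrix ops)).length : Int)
      = (max_n * max_n + max_n) / 2 - 1 := by
    rw [pv_flat_len (pvBlk matrix ops) 1 max_n (by omega) h ?_]
    · norm_num
    · intro col h1 h2
      simp [pvBlk, PySem.List.length_pyRange_one]
      omega
  have htot := pv_total max_n
  have hlen : (PySem.Int.floordiv ((max_n + 2) * (max_n - 1)) 2 - 0).toNat
      = ((PySem.List.pyRange 1 max_n 1).flatMap (pvBlk matrix ops)).length := by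
    omega
  rw [hlen, pv_cols matrix ops max_n (max_n - 1).toNat 1 [] le_rfl (by omega)]
  simp

-- ===== VERDICT (by name: the statement is the Claim_ definition above) =====
theorem convert_arch_to_seq_spec : Claim_equal_convert_arch_to_seq := by
  intro matrix ops max_n _ hpre
  exact (pv_A matrix ops max_n).trans (pv_B matrix ops max_n hpre.2.1).symm
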